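-- pv_equiv track=rewrite | github.com/DarrenKwonDev/py-web-browser | browser.py | resolve_url
-- ===== SOURCE A (Python) =====
-- def resolve_url(url, current):
--     if "://" in url:
--         return url
--     elif url.startswith("/"):
--         scheme, hostpath = current.split("://", 1)
--         host, oldpath = hostpath.split("/", 1)
--         return scheme + "://" + host + url
--     else:
--         scheme, hostpath = current.split("://", 1)
--         if "/" not in hostpath:
--             current = current + "/"
--         dir, _ = current.rsplit("/", 1)
--         while url.startswith("../"):
--             url = url[3:]
--             if dir.count("/") == 2: continue
--             dir, _ = dir.rsplit("/", 1)
--         return dir + "/" + url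
-- ===== SOURCE B (Python) =====
-- def resolve_url(url, current):
--     if "://" in url:
--         return url
--     scheme, hostpath = current.split("://", 1)
--     if url.startswith("/"):
--         host, _ = hostpath.split("/", 1)
--         return scheme + "://" + host + url
--     if "/" not in hostpath:
--         current = current + "/"
--     parts = current.split("/")[:-1]
--     k = 0
--     while url.startswith("../", 3 * k):
--         k += 1
--     drop = max(0, min(k, len(parts) - 3))
--     return "/".join(parts[:len(parts) - drop]) + "/" + url[3 * k:]
-- ===== Notes on version B (the rewrite author's own statement) =====
-- stated objective: alternative
-- what changed: B eliminates A's while loop that alternately strips one '../' and rsplits the shrinking dir string: it counts the leading '../' prefixes arithmetically (k), computes the number of directory segments to discard in one closed-form expression max(0, min(k, len(parts)-3)), and builds the result with a single slice, join and tail-slice of url.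
import Mathlib
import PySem

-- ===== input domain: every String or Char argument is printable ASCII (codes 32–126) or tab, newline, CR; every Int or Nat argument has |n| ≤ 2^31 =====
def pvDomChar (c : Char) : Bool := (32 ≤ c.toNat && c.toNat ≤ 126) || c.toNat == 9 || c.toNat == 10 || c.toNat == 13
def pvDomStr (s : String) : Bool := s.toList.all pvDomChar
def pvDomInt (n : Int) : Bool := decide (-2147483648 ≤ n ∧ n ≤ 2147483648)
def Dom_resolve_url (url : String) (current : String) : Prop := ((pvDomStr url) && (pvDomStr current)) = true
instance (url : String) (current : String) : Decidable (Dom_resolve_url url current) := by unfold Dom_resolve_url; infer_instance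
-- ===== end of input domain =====

-- B replaces A's strip-one-'../'-then-rsplit while loop by an arithmetic count of the leading
-- '../' prefixes plus one closed-form min/max segment-drop, a single slice and a single join;
-- same return value on all well-formed inputs (Pre_ below).


-- ===== PORT A =====
-- hand port of s.rsplit(sep, 1) for a one-character sep (PySem has no rsplit):
-- exact: splits at the LAST occurrence of c; none exactly where Python's 2-tuple unpacking raises (c absent).
def rsplit1? : List Char → Char → Option (List Char × List Char)
  | [], _ => none
  | x :: xs, c =>
    match rsplit1? xs c with
    | some (a, b) => some (x :: a, b)
    | none => if x = c then some ([], xs) else none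

-- url[3:] shortens url when it starts with "../" (termination of the while loop)
theorem pvSliceFrom3_lt (u : List Char) (h : PySem.Chars.startswith u ['.', '.', '/'] = true) :
    (PySem.Chars.slice u (some 3) none).length < u.length := by
  have hp := (PySem.Chars.startswith_iff u _).mp h
  have h3 : 3 ≤ u.length := by simpa using hp.length_le
  have he : PySem.Chars.slice u (some 3) none = u.drop 3 := by
    have := PySem.List.slice_from_natCast u 3
    simpa [PySem.Chars.slice_eq_listSlice] using this
  rw [he]; simp; omega

-- the while loop of A: state (dir, url)
def pvLoopA (dirv urlv : List Char) : List Char × List Char :=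
  if h : PySem.Chars.startswith urlv ['.', '.', '/'] = true then
    let urlv' := PySem.Chars.slice urlv (some 3) none   -- url = url[3:]
    if PySem.Chars.count dirv ['/'] = 2 then pvLoopA dirv urlv'
    else
      match rsplit1? dirv '/' with
      | some (d, _) => pvLoopA d urlv'
      | none => (dirv, urlv')   -- Python raises ValueError here (outside Pre_)
  else (dirv, urlv)
termination_by urlv.length
decreasing_by all_goals exact pvSliceFrom3_lt urlv h

def pvResolveA (urlv curv : List Char) : List Char :=
  if PySem.Chars.isIn [':', '/', '/'] urlv then urlv
  else if PySem.Chars.startswith urlv ['/'] then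
    match PySem.Chars.splitMax? curv [':', '/', '/'] 1 with
    | some [scheme, hostpath] =>
      match PySem.Chars.splitMax? hostpath ['/'] 1 with
      | some [host, _oldpath] => scheme ++ [':', '/', '/'] ++ host ++ urlv
      | _ => []   -- ValueError in Python (outside Pre_)
    | _ => []     -- ValueError in Python (outside Pre_)
  else
    match PySem.Chars.splitMax? curv [':', '/', '/'] 1 with
    | some [_scheme, hostpath] =>
      let curv' := if PySem.Chars.isIn ['/'] hostpath then curv else curv ++ ['/']
      match rsplit1? curv' '/' with
      | some (dir0, _) =>
        let r := pvLoopA dir0 urlv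
        r.1 ++ ['/'] ++ r.2
      | none => []   -- ValueError in Python (outside Pre_)
    | _ => []        -- ValueError in Python (outside Pre_)

def resolve_url (url : String) (current : String) : String :=
  String.ofList (pvResolveA url.toList current.toList)

-- ===== PORT B =====
-- B's counting loop: k = number of leading '../' prefixes of url.
-- Python's url.startswith("../", 3*k) with a nonnegative start is exact as startswith on drop (3*k)
-- (a start past the end gives a shorter-than-prefix remainder, hence False, in both).
def pvCountDots (u : List Char) (k : Nat) : Nat :=
  if h : PySem.Chars.startswith (u.drop (3 * k)) ['.', '.', '/'] = true then pvCountDots u (k + 1)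
  else k
termination_by u.length - 3 * k
decreasing_by
  have hp := (PySem.Chars.startswith_iff _ _).mp h
  have h3 : 3 ≤ (u.drop (3 * k)).length := by simpa using hp.length_le
  simp at h3; omega

def pvResolveB (urlv curv : List Char) : List Char :=
  if PySem.Chars.isIn [':', '/', '/'] urlv then urlv
  else
    match PySem.Chars.splitMax? curv [':', '/', '/'] 1 with
    | some [scheme, hostpath] =>
      if PySem.Chars.startswith urlv ['/'] then
        match PySem.Chars.splitMax? hostpath ['/'] 1 with
        | some [host, _] => scheme ++ [':', '/', '/'] ++ host ++ urlv
        | _ => []   -- ValueError in Python (outside Pre_)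
      else
        let curv' := if PySem.Chars.isIn ['/'] hostpath then curv else curv ++ ['/']   -- current += "/"
        let parts := PySem.List.slice (PySem.Chars.splitOn curv' ['/']) none (some (-1))   -- current.split("/")[:-1]
        let k := pvCountDots urlv 0
        let dropn : Int := max 0 (min (k : Int) ((parts.length : Int) - 3))
        let keep := PySem.List.slice parts none (some ((parts.length : Int) - dropn))   -- parts[:len(parts)-drop]
        PySem.Chars.join ['/'] keep ++ ['/'] ++ PySem.Chars.slice urlv (some ((3 * k : Nat) : Int)) none
    | _ => []   -- ValueError in Python (outside Pre_)

def resolve_url_alt (url : String) (current : String) : String :=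
  String.ofList (pvResolveB url.toList current.toList)

-- ===== PRECONDITION & SPEC =====
-- Pre_ excludes exactly the inputs on which A raises ValueError: a relative url whose current has
-- no "://", or a "/"-prefixed url whose current has no "/" after the first "://".
def Pre_resolve_url (url : String) (current : String) : Prop :=
  PySem.Str.isIn "://" url = true ∨
  (PySem.Str.isIn "://" current = true ∧
    (PySem.Str.startswith url "/" = true →
      PySem.Chars.isIn ['/'] (current.toList.drop ((PySem.Chars.find current.toList [':', '/', '/']).toNat + 3)) = true))
instance (url : String) (current : String) : Decidable (Pre_resolve_url url current) := by
  unfold Pre_resolve_url; infer_instance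

def pvWitness_resolve_url : String × String := ("../style.css", "http://example.org/a/b.html")

def Spec_resolve_url (url : String) (current : String) (out : String) : Prop := out = resolve_url_alt url current
instance (url : String) (current : String) (out : String) : Decidable (Spec_resolve_url url current out) := by
  unfold Spec_resolve_url; infer_instance

-- ===== CLAIM (what is proved, stated in full; the proofs are below) =====
def Claim_equal_resolve_url : Prop := ∀ (url : String) (current : String), Dom_resolve_url url current → Pre_resolve_url url current → Spec_resolve_url url current (resolve_url url current)
-- ===== LEMMAS AND PROOFS =====

-- number of leading "../" prefixes, as structural recursion (proof-side view of pvCountDots)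
def pvLeadK (u : List Char) : Nat :=
  if h : PySem.Chars.startswith u ['.', '.', '/'] = true then pvLeadK (u.drop 3) + 1 else 0
termination_by u.length
decreasing_by
  have hp := (PySem.Chars.startswith_iff _ _).mp h
  have h3 : 3 ≤ u.length := by simpa using hp.length_le
  simp; omega

theorem pvSlice3 (u : List Char) : PySem.Chars.slice u (some 3) none = u.drop 3 := by
  have := PySem.List.slice_from_natCast u 3
  simpa [PySem.Chars.slice_eq_listSlice] using this

theorem pvCountDots_eq_aux (u : List Char) :
    ∀ n k, u.length - 3 * k ≤ n → pvCountDots u k = k + pvLeadK (u.drop (3 * k)) := by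
  intro n
  induction n with
  | zero =>
    intro k hk
    have hnil : u.drop (3 * k) = [] := List.drop_eq_nil_of_le (by omega)
    rw [pvCountDots, pvLeadK]
    rw [hnil]
    rw [dif_neg (by decide), dif_neg (by decide)]
    omega
  | succ m ih =>
    intro k hk
    rw [pvCountDots, pvLeadK]
    by_cases hsw : PySem.Chars.startswith (u.drop (3 * k)) ['.', '.', '/'] = true
    · rw [dif_pos hsw, dif_pos hsw]
      have hp := (PySem.Chars.startswith_iff _ _).mp hsw
      have h3 : 3 ≤ (u.drop (3 * k)).length := by simpa using hp.length_le
      simp only [List.length_drop] at h3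
      rw [ih (k + 1) (by omega)]
      rw [List.drop_drop]
      have h33 : 3 * k + 3 = 3 * (k + 1) := by omega
      rw [h33]
      omega
    · rw [dif_neg hsw, dif_neg hsw]
      omega

theorem pvCountDots_eq (u : List Char) : pvCountDots u 0 = pvLeadK u := by
  have := pvCountDots_eq_aux u u.length 0 (by omega)
  simpa using this

def pvConsHead (pre : List Char) : List (List Char) → List (List Char)
  | [] => [pre]
  | p :: ps => (pre ++ p) :: ps

def pvPieces (c : Char) : List Char → List (List Char)
  | [] => [[]]
  | x :: t => if x = c then [] :: pvPieces c t else pvConsHead [x] (pvPieces c t)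

theorem pvConsHead_ne_nil (pre : List Char) (l : List (List Char)) : pvConsHead pre l ≠ [] := by
  cases l <;> simp [pvConsHead]

theorem pvPieces_ne_nil (c : Char) (s : List Char) : pvPieces c s ≠ [] := by
  cases s with
  | nil => simp [pvPieces]
  | cons x t =>
    simp only [pvPieces]
    split
    · simp
    · exact pvConsHead_ne_nil _ _

theorem pvConsHead_append (pre : List Char) (l : List (List Char)) (h : l ≠ []) :
    ∃ p ps, l = p :: ps ∧ pvConsHead pre l = (pre ++ p) :: ps := by
  cases l with
  | nil => exact absurd rfl h
  | cons p ps => exact ⟨p, ps, rfl, rfl⟩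

theorem pv_join_pieces (c : Char) (s : List Char) :
    PySem.Chars.join [c] (pvPieces c s) = s := by
  induction s with
  | nil => simp [pvPieces, PySem.Chars.join_singleton]
  | cons x t ih =>
    obtain ⟨p, ps, hpt, _⟩ := pvConsHead_append [x] _ (pvPieces_ne_nil c t)
    simp only [pvPieces]
    by_cases hx : x = c
    · rw [if_pos hx, hpt, PySem.Chars.join_cons_cons]
      rw [hpt] at ih; simp [ih, hx]
    · rw [if_neg hx, hpt]
      rw [hpt] at ih
      cases ps with
      | nil =>
        simp [pvConsHead, PySem.Chars.join_singleton] at ih ⊢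
        simp [ih]
      | cons q qs =>
        simp only [pvConsHead]
        rw [PySem.Chars.join_cons_cons] at ih ⊢
        simp [← ih]

theorem pv_not_mem_pieces (c : Char) (s : List Char) : ∀ p ∈ pvPieces c s, c ∉ p := by
  induction s with
  | nil => simp [pvPieces]
  | cons x t ih =>
    obtain ⟨p, ps, hpt, _⟩ := pvConsHead_append [x] _ (pvPieces_ne_nil c t)
    simp only [pvPieces]
    by_cases hx : x = c
    · rw [if_pos hx, hpt]
      intro q hq
      rcases List.mem_cons.mp hq with hq | hq
      · simp [hq]
      · exact ih q (hpt ▸ hq)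
    · rw [if_neg hx, hpt]
      simp only [pvConsHead]
      intro q hq
      rcases List.mem_cons.mp hq with hq | hq
      · subst hq
        intro hc
        rcases List.mem_append.mp hc with hc | hc
        · simp at hc; exact hx hc.symm
        · exact ih p (hpt ▸ List.mem_cons_self ..) hc
      · exact ih q (hpt ▸ List.mem_cons_of_mem _ hq)

theorem pv_length_pieces (c : Char) (s : List Char) :
    (pvPieces c s).length = s.count c + 1 := by
  induction s with
  | nil => simp [pvPieces]
  | cons x t ih =>
    obtain ⟨p, ps, hpt, _⟩ := pvConsHead_append [x] _ (pvPieces_ne_nil c t)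
    simp only [pvPieces]
    by_cases hx : x = c
    · rw [if_pos hx]
      simp [hx, ih]
    · rw [if_neg hx, hpt]
      rw [hpt] at ih
      simp only [pvConsHead]
      simp at ih ⊢
      simp [hx, ih]

theorem pv_count_go_single (c : Char) :
    ∀ (l : List Char) (fuel : Nat) (acc : Nat), l.length ≤ fuel →
      PySem.Chars.count.go [c] fuel l acc = acc + l.count c := by
  intro l
  induction l with
  | nil => intro fuel acc _; cases fuel <;> simp [PySem.Chars.count.go]
  | cons x t ih =>
    intro fuel acc hf
    cases fuel with
    | zero => simp at hf
    | succ f =>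
      simp only [PySem.Chars.count.go]
      by_cases hx : x = c
      · rw [if_pos (by simp [List.isPrefixOf, hx])]
        rw [show ([c].length = 1) from rfl]
        simp only [List.drop_succ_cons, List.drop_zero]
        rw [ih f (acc + 1) (by simpa using hf)]
        simp [List.count_cons, hx]
        omega
      · rw [if_neg (by simp [List.isPrefixOf]; intro h; exact absurd h.symm hx)]
        rw [ih f acc (by simpa using hf)]
        simp [List.count_cons, hx]

theorem pv_count_single (s : List Char) (c : Char) :
    PySem.Chars.count s [c] = s.count c := by
  simp only [PySem.Chars.count]
  rw [if_neg (by simp)]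
  simpa using pv_count_go_single c s s.length 0 le_rfl

theorem pv_splitOn_go_single (c : Char) :
    ∀ (l : List Char) (fuel : Nat) (cur : List Char) (acc : List (List Char)), l.length < fuel →
      PySem.Chars.splitOn.go [c] fuel l cur acc = acc.reverse ++ pvConsHead cur.reverse (pvPieces c l) := by
  intro l
  induction l with
  | nil =>
    intro fuel cur acc hf
    cases fuel with
    | zero => omega
    | succ f => simp [PySem.Chars.splitOn.go, pvPieces, pvConsHead]
  | cons x t ih =>
    intro fuel cur acc hf
    cases fuel with
    | zero => omega
    | succ f =>
      simp only [PySem.Chars.splitOn.go]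
      by_cases hx : x = c
      · rw [if_pos (by simp [List.isPrefixOf, hx])]
        rw [show ([c].length = 1) from rfl]
        simp only [List.drop_succ_cons, List.drop_zero]
        rw [ih f [] (cur.reverse :: acc) (by simp at hf ⊢; omega)]
        simp only [pvPieces, if_pos hx]
        cases hpt : pvPieces c t with
        | nil => exact absurd hpt (pvPieces_ne_nil c t)
        | cons p ps => simp [pvConsHead]
      · rw [if_neg (by simp [List.isPrefixOf]; intro h; exact absurd h.symm hx)]
        rw [ih f (x :: cur) acc (by simp at hf ⊢; omega)]
        simp only [pvPieces, if_neg hx]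
        cases hpt : pvPieces c t with
        | nil => exact absurd hpt (pvPieces_ne_nil c t)
        | cons p ps => simp [pvConsHead]

theorem pv_splitOn_single (s : List Char) (c : Char) :
    PySem.Chars.splitOn s [c] = pvPieces c s := by
  simp only [PySem.Chars.splitOn]
  rw [pv_splitOn_go_single c s (s.length + 1) [] [] (by omega)]
  cases hpt : pvPieces c s with
  | nil => exact absurd hpt (pvPieces_ne_nil c s)
  | cons p ps => simp [pvConsHead]

theorem pv_splitOnMax_go_zero (sep : List Char) :
    ∀ (fuel : Nat) (l cur : List Char) (acc : List (List Char)),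
      PySem.Chars.splitOnMax.go sep fuel 0 l cur acc = ((cur.reverse ++ l) :: acc).reverse := by
  intro fuel l cur acc
  cases fuel with
  | zero => simp [PySem.Chars.splitOnMax.go]
  | succ f => cases l <;> simp [PySem.Chars.splitOnMax.go]

theorem pv_splitOnMax_go_one (sep b : List Char) (hsep : sep ≠ []) :
    ∀ (a : List Char) (fuel : Nat) (cur : List Char) (acc : List (List Char)),
      a.length < fuel →
      (∀ i, i < a.length → ¬ sep <+: (a ++ sep ++ b).drop i) →
      PySem.Chars.splitOnMax.go sep fuel 1 (a ++ sep ++ b) cur acc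
        = acc.reverse ++ [cur.reverse ++ a, b] := by
  intro a
  induction a with
  | nil =>
    intro fuel cur acc hf _
    cases fuel with
    | zero => omega
    | succ f =>
      simp only [List.nil_append]
      cases hsb : sep ++ b with
      | nil => exact absurd (by cases sep <;> simp_all) hsep
      | cons y ys =>
        rw [← hsb]
        have : PySem.Chars.splitOnMax.go sep (f + 1) 1 (sep ++ b) cur acc
            = PySem.Chars.splitOnMax.go sep f 0 (List.drop sep.length (sep ++ b)) [] (cur.reverse :: acc) := by
          rw [hsb]
          simp only [PySem.Chars.splitOnMax.go]
          rw [if_neg (by omega), if_pos (by rw [← hsb]; exact List.isPrefixOf_iff_prefix.mpr (List.prefix_append sep b))]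
        rw [this, List.drop_left, pv_splitOnMax_go_zero]
        simp
  | cons x a' ih =>
    intro fuel cur acc hf hocc
    cases fuel with
    | zero => omega
    | succ f =>
      simp only [List.cons_append]
      simp only [PySem.Chars.splitOnMax.go]
      rw [if_neg (by omega)]
      rw [if_neg (by
        intro hpre
        have := hocc 0 (by simp)
        simp only [List.drop_zero] at this
        exact this (by simpa [List.cons_append] using List.isPrefixOf_iff_prefix.mp hpre))]
      rw [ih f (x :: cur) acc (by simp at hf ⊢; omega) (by
        intro i hi
        have := hocc (i + 1) (by simp; omega)
        simpa [List.cons_append] using this)]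
      simp

theorem pv_find_eq (a sub b : List Char)
    (hocc : ∀ i, i < a.length → ¬ sub <+: (a ++ sub ++ b).drop i) :
    PySem.Chars.find (a ++ sub ++ b) sub = (a.length : Int) := by
  set s := a ++ sub ++ b with hs
  have hinf : sub <:+: s := ⟨a, b, by simp [hs]⟩
  have hnn : 0 ≤ PySem.Chars.find s sub := (PySem.Chars.find_nonneg_iff s sub).mpr hinf
  obtain ⟨hpre, hmin⟩ := PySem.Chars.find_spec hnn
  have hk : (PySem.Chars.find s sub).toNat = a.length := by
    by_contra hne
    rcases Nat.lt_or_ge (PySem.Chars.find s sub).toNat a.length with hlt | hge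
    · exact hocc _ hlt hpre
    · have hlt : a.length < (PySem.Chars.find s sub).toNat := by omega
      exact hmin a.length hlt (by simp [hs, List.drop_left'] )
  omega

theorem pv_splitMax?_one (sep a b : List Char) (hsep : sep ≠ [])
    (hocc : ∀ i, i < a.length → ¬ sep <+: (a ++ sep ++ b).drop i) :
    PySem.Chars.splitMax? (a ++ sep ++ b) sep 1 = some [a, b] := by
  simp only [PySem.Chars.splitMax?]
  rw [if_neg (by simpa using hsep)]
  simp only [PySem.Chars.splitOnMax]
  rw [if_neg (by omega)]
  rw [show ((1 : Int).toNat = 1) from rfl]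
  rw [pv_splitOnMax_go_one sep b hsep a ((a ++ sep ++ b).length + 1) [] [] (by simp) hocc]
  simp

theorem pv_rsplit1?_none (c : Char) (q : List Char) (h : c ∉ q) : rsplit1? q c = none := by
  induction q with
  | nil => rfl
  | cons x xs ih =>
    simp only [rsplit1?]
    rw [ih (fun hm => h (List.mem_cons_of_mem _ hm))]
    rw [if_neg (by intro hx; exact h (by simp [hx]))]

theorem pv_rsplit1?_last (c : Char) (x q : List Char) (h : c ∉ q) :
    rsplit1? (x ++ c :: q) c = some (x, q) := by
  induction x with
  | nil =>
    simp only [List.nil_append, rsplit1?]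
    rw [pv_rsplit1?_none c q h]
    simp
  | cons y ys ih =>
    simp only [List.cons_append, rsplit1?]
    rw [ih]

-- join over an appended last element
theorem pv_join_append_last (c : Char) (ps : List (List Char)) (q : List Char) (h : ps ≠ []) :
    PySem.Chars.join [c] (ps ++ [q]) = PySem.Chars.join [c] ps ++ c :: q := by
  induction ps with
  | nil => exact absurd rfl h
  | cons p rest ih =>
    cases rest with
    | nil => simp [PySem.Chars.join_cons_cons, PySem.Chars.join_singleton]
    | cons r rs =>
      rw [show ((p :: r :: rs) ++ [q] = p :: ((r :: rs) ++ [q])) from rfl]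
      rw [show ((r :: rs) ++ [q] = r :: (rs ++ [q])) from rfl]
      rw [PySem.Chars.join_cons_cons, PySem.Chars.join_cons_cons]
      rw [show (r :: (rs ++ [q]) = (r :: rs) ++ [q]) from rfl]
      rw [ih (by simp)]
      simp

theorem pv_count_join (c : Char) (parts : List (List Char)) (h : ∀ p ∈ parts, c ∉ p) (hne : parts ≠ []) :
    (PySem.Chars.join [c] parts).count c = parts.length - 1 := by
  induction parts with
  | nil => exact absurd rfl hne
  | cons p rest ih =>
    cases rest with
    | nil =>
      simp [PySem.Chars.join_singleton]
      exact List.count_eq_zero.mpr (h p (by simp))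
    | cons r rs =>
      rw [PySem.Chars.join_cons_cons]
      have h1 : (p : List Char).count c = 0 := List.count_eq_zero.mpr (h p (by simp))
      have h2 := ih (fun q hq => h q (List.mem_cons_of_mem _ hq)) (by simp)
      simp [List.count_append, h1, h2, List.count_cons]

theorem pv_isIn_single (c : Char) (l : List Char) : PySem.Chars.isIn [c] l = true ↔ c ∈ l := by
  rw [PySem.Chars.isIn_iff_infix]
  constructor
  · intro h; exact (List.singleton_sublist).mp h.sublist
  · intro h
    obtain ⟨s, t, hst⟩ := List.append_of_mem h
    exact ⟨s, t, by simp [hst]⟩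

theorem pv_dropLast_take (parts : List (List Char)) (m : Nat) (hm : m ≤ parts.length - 1) :
    parts.dropLast.take m = parts.take m := by
  rw [List.dropLast_eq_take, List.take_take]
  congr 1
  omega

-- closed-form characterization of A's while loop
theorem pv_loop_closed :
    ∀ (n : Nat) (urlv : List Char), urlv.length ≤ n →
    ∀ (parts : List (List Char)), 3 ≤ parts.length → (∀ p ∈ parts, '/' ∉ p) →
    pvLoopA (PySem.Chars.join ['/'] parts) urlv
      = (PySem.Chars.join ['/'] (parts.take (parts.length - min (pvLeadK urlv) (parts.length - 3))),
         urlv.drop (3 * pvLeadK urlv)) := by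
  intro n
  induction n with
  | zero =>
    intro urlv hlen parts hlp hfree
    have hu : urlv = [] := by cases urlv <;> simp_all
    subst hu
    rw [pvLoopA, pvLeadK]
    rw [dif_neg (by decide), dif_neg (by decide)]
    simp
  | succ m ih =>
    intro urlv hlen parts hlp hfree
    rw [pvLoopA, pvLeadK]
    by_cases hsw : PySem.Chars.startswith urlv ['.', '.', '/'] = true
    · rw [dif_pos hsw, dif_pos hsw]
      rw [pvSlice3]
      have hlen' : (urlv.drop 3).length ≤ m := by
        have := pvSliceFrom3_lt urlv hsw
        rw [pvSlice3] at this
        omega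
      have hne : parts ≠ [] := by intro hnil; rw [hnil] at hlp; simp at hlp
      have hcnt : PySem.Chars.count (PySem.Chars.join ['/'] parts) ['/'] = parts.length - 1 := by
        rw [pv_count_single]
        exact pv_count_join '/' parts hfree hne
      set k' := pvLeadK (urlv.drop 3) with hk'
      by_cases hthree : parts.length = 3
      · have hc2 : PySem.Chars.count (PySem.Chars.join ['/'] parts) ['/'] = 2 := by
          rw [hcnt, hthree]
        rw [if_pos hc2]
        rw [ih _ hlen' parts hlp hfree]
        rw [List.drop_drop]
        simp only [Prod.mk.injEq]
        constructor
        · congr 2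
          omega
        · congr 1
          omega
      · have hlt : 3 < parts.length := by omega
        rw [if_neg (by rw [hcnt]; omega)]
        have hdecomp := List.dropLast_append_getLast hne
        have hdl_ne : parts.dropLast ≠ [] := by
          have hld : (parts.dropLast).length = parts.length - 1 := List.length_dropLast
          intro hnil
          rw [hnil] at hld
          simp at hld
          omega
        have hjoin : PySem.Chars.join ['/'] parts
            = PySem.Chars.join ['/'] parts.dropLast ++ '/' :: parts.getLast hne := by
          conv_lhs => rw [← hdecomp]
          exact pv_join_append_last '/' parts.dropLast (parts.getLast hne) hdl_ne
        have hlast_free : '/' ∉ parts.getLast hne := hfree _ (List.getLast_mem hne)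
        have hr : rsplit1? (PySem.Chars.join ['/'] parts) '/'
            = some (PySem.Chars.join ['/'] parts.dropLast, parts.getLast hne) := by
          rw [hjoin]
          exact pv_rsplit1?_last '/' _ _ hlast_free
        rw [hr]
        dsimp only
        rw [ih _ hlen' parts.dropLast (by rw [List.length_dropLast]; omega)
          (fun p hp => hfree p ((List.dropLast_sublist parts).subset hp))]
        rw [List.drop_drop]
        simp only [Prod.mk.injEq]
        constructor
        · rw [pv_dropLast_take]
          · congr 2
            rw [List.length_dropLast]
            omega
          · rw [List.length_dropLast]
            omega
        · congr 1
          omega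
    · rw [dif_neg hsw, dif_neg hsw]
      simp

theorem pv_decomp (sep cv : List Char) (h : PySem.Chars.isIn sep cv = true) :
    ∃ sch b, cv = sch ++ sep ++ b ∧ sch.length = (PySem.Chars.find cv sep).toNat ∧
      (∀ i, i < sch.length → ¬ sep <+: cv.drop i) := by
  have hinf := (PySem.Chars.isIn_iff_infix sep cv).mp h
  have hnn : 0 ≤ PySem.Chars.find cv sep := (PySem.Chars.find_nonneg_iff cv sep).mpr hinf
  obtain ⟨hpre, hmin⟩ := PySem.Chars.find_spec hnn
  have hk : (PySem.Chars.find cv sep).toNat ≤ cv.length := by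
    have := PySem.Chars.find_le_length cv sep
    omega
  obtain ⟨b, hb⟩ := hpre
  refine ⟨cv.take (PySem.Chars.find cv sep).toNat, b, ?_, ?_, ?_⟩
  · conv_lhs => rw [← List.take_append_drop (PySem.Chars.find cv sep).toNat cv]
    rw [← hb]
    simp [List.append_assoc]
  · simp [hk]
  · intro i hi
    exact hmin i (by simp [hk] at hi; omega)

theorem pv_splitMax?_one' (sep cv sch b : List Char) (hsep : sep ≠ []) (hcv : cv = sch ++ sep ++ b)
    (hocc : ∀ i, i < sch.length → ¬ sep <+: cv.drop i) :
    PySem.Chars.splitMax? cv sep 1 = some [sch, b] := by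
  rw [hcv]
  exact pv_splitMax?_one sep sch b hsep (by rw [← hcv]; exact hocc)

-- ===== VERDICT (by name: the statement is the Claim_ definition above) =====
theorem resolve_url_spec : Claim_equal_resolve_url := by
  intro url current _ hpre
  unfold Spec_resolve_url resolve_url resolve_url_alt
  congr 1
  by_cases h1 : PySem.Chars.isIn [':', '/', '/'] url.toList = true
  · simp only [pvResolveA, pvResolveB, h1, if_pos]
  · rcases hpre with hp | ⟨hcur, hpre2⟩
    · rw [PySem.Str.isIn_eq] at hp; exact absurd hp h1
    rw [PySem.Str.isIn_eq] at hcur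
    obtain ⟨sch, b, hcv, _, hocc⟩ := pv_decomp [':', '/', '/'] current.toList hcur
    have hsplit := pv_splitMax?_one' [':', '/', '/'] current.toList sch b (by decide) hcv hocc
    have hb_eq : current.toList.drop ((PySem.Chars.find current.toList [':', '/', '/']).toNat + 3) = b := by
      have hfind : PySem.Chars.find current.toList [':', '/', '/'] = (sch.length : Int) := by
        rw [hcv]; exact pv_find_eq sch [':', '/', '/'] b (by rw [← hcv]; exact hocc)
      rw [hfind, Int.toNat_natCast, hcv]
      rw [show sch.length + 3 = (sch ++ [':', '/', '/']).length by simp]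
      rw [show sch ++ [':', '/', '/'] ++ b = (sch ++ [':', '/', '/']) ++ b by simp]
      exact List.drop_left ..
    by_cases h2 : PySem.Chars.startswith url.toList ['/'] = true
    · -- absolute path branch
      have hpre2' := hpre2 (by rw [PySem.Str.startswith_eq]; exact h2)
      rw [hb_eq] at hpre2'
      obtain ⟨h0, rest, hbdec, _, hocc2⟩ := pv_decomp ['/'] b hpre2'
      have hsplit2 := pv_splitMax?_one' ['/'] b h0 rest (by decide) hbdec hocc2
      simp only [pvResolveA, pvResolveB, h1, if_neg, h2, if_pos, hsplit, hsplit2]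
    · -- relative branch
      set hp' := if PySem.Chars.isIn ['/'] b then b else b ++ ['/'] with hhp'
      have hcurv' : (if PySem.Chars.isIn ['/'] b then current.toList else current.toList ++ ['/'])
          = sch ++ [':', '/', '/'] ++ hp' := by
        rw [hhp', hcv]
        split
        · rfl
        · simp
      have hmem : '/' ∈ sch ++ [':', '/', '/'] ++ hp' := by simp
      have hpne := pvPieces_ne_nil '/' (sch ++ [':', '/', '/'] ++ hp')
      have hpieces_len : 2 ≤ (pvPieces '/' (sch ++ [':', '/', '/'] ++ hp')).length := by
        rw [pv_length_pieces]
        have := List.one_le_count_iff.mpr hmem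
        omega
      have hdl_ne : (pvPieces '/' (sch ++ [':', '/', '/'] ++ hp')).dropLast ≠ [] :=
        List.ne_nil_of_length_pos (by rw [List.length_dropLast]; omega)
      have hjoin : sch ++ [':', '/', '/'] ++ hp'
          = PySem.Chars.join ['/'] ((pvPieces '/' (sch ++ [':', '/', '/'] ++ hp')).dropLast)
            ++ '/' :: (pvPieces '/' (sch ++ [':', '/', '/'] ++ hp')).getLast hpne := by
        conv_lhs => rw [← pv_join_pieces '/' (sch ++ [':', '/', '/'] ++ hp')]
        conv_lhs => rw [← List.dropLast_append_getLast hpne]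
        exact pv_join_append_last '/' _ _ hdl_ne
      have hlast_free : '/' ∉ (pvPieces '/' (sch ++ [':', '/', '/'] ++ hp')).getLast hpne :=
        pv_not_mem_pieces '/' _ _ (List.getLast_mem hpne)
      have hrsplit : rsplit1? (sch ++ [':', '/', '/'] ++ hp') '/'
          = some (PySem.Chars.join ['/'] ((pvPieces '/' (sch ++ [':', '/', '/'] ++ hp')).dropLast),
                  (pvPieces '/' (sch ++ [':', '/', '/'] ++ hp')).getLast hpne) := by
        conv_lhs => rw [hjoin]
        exact pv_rsplit1?_last '/' _ _ hlast_free
      have hcnt3 : 3 ≤ (sch ++ [':', '/', '/'] ++ hp').count '/' := by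
        have hm1 : '/' ∈ hp' := by
          rw [hhp']
          split
          · rename_i hin; exact (pv_isIn_single '/' b).mp hin
          · simp
        have := List.one_le_count_iff.mpr hm1
        simp [List.count_append]
        omega
      set dl := (pvPieces '/' (sch ++ [':', '/', '/'] ++ hp')).dropLast with hdl
      have hlen3 : 3 ≤ dl.length := by
        rw [hdl, List.length_dropLast, pv_length_pieces]
        omega
      have hdl_free : ∀ p ∈ dl, '/' ∉ p :=
        fun p hp => pv_not_mem_pieces '/' _ p ((List.dropLast_sublist _).subset hp)
      have hclosed := pv_loop_closed url.toList.length url.toList le_rfl dl hlen3 hdl_free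
      -- B-side arithmetic: drop and keep
      have hkeq : pvCountDots url.toList 0 = pvLeadK url.toList := pvCountDots_eq url.toList
      set k := pvLeadK url.toList with hkk
      have hdropn : max 0 (min ((k : Nat) : Int) ((dl.length : Int) - 3))
          = ((min k (dl.length - 3) : Nat) : Int) := by
        omega
      have hkeep : PySem.List.slice dl none (some ((dl.length : Int) - ((min k (dl.length - 3) : Nat) : Int)))
          = dl.take (dl.length - min k (dl.length - 3)) := by
        have : (dl.length : Int) - ((min k (dl.length - 3) : Nat) : Int)
            = ((dl.length - min k (dl.length - 3) : Nat) : Int) := by omega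
        rw [this, PySem.List.slice_to_natCast]
      have hslice_url : PySem.Chars.slice url.toList (some ((3 * k : Nat) : Int)) none
          = url.toList.drop (3 * k) := by
        have := PySem.List.slice_from_natCast url.toList (3 * k)
        simpa [PySem.Chars.slice_eq_listSlice] using this
      simp only [pvResolveA, pvResolveB, h1, h2, hsplit, pv_splitOn_single,
        Bool.false_eq_true, if_false]
      rw [hcurv', hrsplit, PySem.List.slice_to_neg_one, ← hdl]
      dsimp only
      rw [hkeq, hdropn, hkeep, hslice_url]
      rw [hclosed]
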